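-- pv_equiv track=rewrite | github.com/AcAndie/C-o-text | utils/content_cleaner.py | _strip_settings_panel
-- ===== SOURCE A (Python) =====
-- from typing import List
--
-- _MIN_REMAINING   = 100   # ký tự tối thiểu sau khi strip
--
-- _SETTINGS_EXACT = frozenset({
--     "font size", "font family", "font color", "font",
--     "color", "color scheme", "theme",
--     "background", "dim background",
--     "reader width", "width", "line spacing", "paragraph spacing",
--     "reading mode", "reading options",
--     "expand", "tighten",    # Royal Road width controls
--     "3/4", "1/2",           # Royal Road width fraction options
-- })
--
-- _SETTINGS_PREFIX = (
--     "theme (", "font size", "font family",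
--     "reading settings", "display settings", "site settings",
-- )
--
-- def _is_settings_line(line: str) -> bool:
--     lo = line.strip().lower()
--     if not lo:
--         return False
--     if lo in _SETTINGS_EXACT:
--         return True
--     if any(lo.startswith(sw) for sw in _SETTINGS_PREFIX):
--         return True
--     return False
--
-- def _strip_settings_panel(text: str) -> str:
--     """
--     Tìm và xóa settings panel blocks.
--     Block = window 8 dòng có >= 4 dòng là settings-like.
--     """
--     lines  = text.splitlines()
--     result : List[str] = []
--     i      = 0
--
--     while i < len(lines):
--         window_size    = min(8, len(lines) - i)
--         window         = lines[i: i + window_size]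
--         settings_count = sum(1 for l in window if _is_settings_line(l))
--
--         if settings_count >= 4:
--             # Skip block: tìm 2 prose lines liên tiếp để dừng
--             j             = i + window_size
--             prose_streak  = 0
--             while j < len(lines):
--                 l = lines[j].strip()
--                 if not l:
--                     j += 1
--                     continue
--                 if not _is_settings_line(lines[j]):
--                     prose_streak += 1
--                     if prose_streak >= 2:
--                         break
--                 else:
--                     prose_streak = 0
--                 j += 1
--             i = j
--         else:
--             result.append(lines[i])
--             i += 1
--
--     candidate = "\n".join(result)
--     return candidate if len(candidate.strip()) >= _MIN_REMAINING else text
-- ===== SOURCE B (Python) =====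
-- from typing import List
--
-- _MIN_REMAINING   = 100
--
-- _SETTINGS_EXACT = frozenset({
--     "font size", "font family", "font color", "font",
--     "color", "color scheme", "theme",
--     "background", "dim background",
--     "reader width", "width", "line spacing", "paragraph spacing",
--     "reading mode", "reading options",
--     "expand", "tighten",
--     "3/4", "1/2",
-- })
--
-- _SETTINGS_PREFIX = (
--     "theme (", "font size", "font family",
--     "reading settings", "display settings", "site settings",
-- )
--
-- def _is_settings_line(line: str) -> bool:
--     lo = line.strip().lower()
--     if not lo:
--         return False
--     if lo in _SETTINGS_EXACT:
--         return True
--     if any(lo.startswith(sw) for sw in _SETTINGS_PREFIX):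
--         return True
--     return False
--
-- def _strip_settings_panel(text: str) -> str:
--     lines = text.splitlines()
--     n = len(lines)
--     # stage 1: classify each line once
--     sflag = [_is_settings_line(l) for l in lines]
--     prose = [bool(lines[k].strip()) and not sflag[k] for k in range(n)]
--     # prevnb[j] = index of the nearest non-blank line strictly before j (or -1)
--     prevnb: List[int] = []
--     last = -1
--     for k in range(n):
--         prevnb.append(last)
--         if lines[k].strip():
--             last = k
--     # prefix sums of settings flags: P[k] = settings-like lines among the first k
--     P = [0] * (n + 1)
--     for k in range(n):
--         P[k + 1] = P[k] + (1 if sflag[k] else 0)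
--     # qual[j]: line j is the second line of a consecutive (blank-separated) prose pair
--     qual = [prose[j] and prevnb[j] >= 0 and prose[prevnb[j]] for j in range(n)]
--     # stage 2: select kept line indices; a panel starting at i ends at the first
--     # qualifying prose pair lying entirely at or after i + w
--     keep_idx: List[int] = []
--     i = 0
--     while i < n:
--         w = min(8, n - i)
--         if P[i + w] - P[i] >= 4:
--             start = i + w
--             i = next((j for j in range(start, n) if qual[j] and prevnb[j] >= start), n)
--         else:
--             keep_idx.append(i)
--             i += 1
--     candidate = "\n".join(lines[j] for j in keep_idx)
--     return candidate if len(candidate.strip()) >= _MIN_REMAINING else text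
-- ===== Notes on version B (the rewrite author's own statement) =====
-- stated objective: alternative
-- what changed: B is a staged table-driven algorithm: it precomputes per-line prose flags, a nearest-previous-non-blank index table, settings prefix sums and a qualifying-pair table, then finds each panel's end as the first qualifying index at/after the window (a first-match table search) instead of A's stateful prose-streak scan, and collects kept line indices instead of lines.
import Mathlib
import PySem

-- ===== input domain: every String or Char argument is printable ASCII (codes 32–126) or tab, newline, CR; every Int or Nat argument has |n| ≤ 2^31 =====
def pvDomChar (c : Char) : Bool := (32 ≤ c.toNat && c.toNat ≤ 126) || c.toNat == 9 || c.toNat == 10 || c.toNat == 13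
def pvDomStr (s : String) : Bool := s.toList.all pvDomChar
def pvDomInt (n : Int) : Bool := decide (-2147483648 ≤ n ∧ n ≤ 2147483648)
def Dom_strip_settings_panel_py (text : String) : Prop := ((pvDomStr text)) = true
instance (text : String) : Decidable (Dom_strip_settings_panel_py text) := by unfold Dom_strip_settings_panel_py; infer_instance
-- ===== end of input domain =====

-- B replaces A's stateful inner prose-streak scan by precomputed tables (prose flags,
-- nearest-previous-non-blank indices, settings prefix sums, a 'qualifying pair' table)
-- and a first-match search over those tables (alternative staged algorithm).
-- (A's while loops are ported with a fuel argument; fuel = number of lines always suffices.)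

-- shared helper: both Pythons define the identical _is_settings_line
def settingsExact : List String :=
  ["font size", "font family", "font color", "font",
   "color", "color scheme", "theme",
   "background", "dim background",
   "reader width", "width", "line spacing", "paragraph spacing",
   "reading mode", "reading options",
   "expand", "tighten",
   "3/4", "1/2"]

def settingsPrefix : List String :=
  ["theme (", "font size", "font family",
   "reading settings", "display settings", "site settings"]

def isSettingsLine (line : String) : Bool :=
  let lo := PySem.Str.lower (PySem.Str.strip line)
  if lo == "" then false
  else if settingsExact.contains lo then true
  else if settingsPrefix.any (fun sw => PySem.Str.startswith lo sw) then true
  else false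

-- ===== PORT A =====

-- inner while loop of A: scan forward from j until two consecutive prose lines
def skipA (lines : List String) (j streak fuel : Nat) : Nat :=
  match fuel with
  | 0 => j
  | fuel + 1 =>
    if j < lines.length then
      if PySem.Str.strip (lines.getD j "") == "" then
        skipA lines (j + 1) streak fuel
      else if !(isSettingsLine (lines.getD j "")) then
        if streak + 1 ≥ 2 then j
        else skipA lines (j + 1) (streak + 1) fuel
      else skipA lines (j + 1) 0 fuel
    else j

-- outer while loop of A: re-counts settings lines over the fresh 8-line window each step
def loopA (lines : List String) (i : Nat) (acc : List String) (fuel : Nat) : List String :=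
  match fuel with
  | 0 => acc
  | fuel + 1 =>
    if i < lines.length then
      let w := min 8 (lines.length - i)
      if ((lines.drop i).take w).countP (fun l => isSettingsLine l) ≥ 4 then
        loopA lines (skipA lines (i + w) 0 lines.length) acc fuel
      else
        loopA lines (i + 1) (acc ++ [lines.getD i ""]) fuel
    else acc

def strip_settings_panel_py (text : String) : String :=
  let lines := PySem.Str.splitlines text
  let candidate := PySem.Str.join "\n" (loopA lines 0 [] lines.length)
  if PySem.Str.len (PySem.Str.strip candidate) ≥ 100 then candidate else text

-- ===== PORT B =====

-- prevnb table: for each position, the index of the nearest non-blank line before it (-1 if none)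
def prevList (ls : List String) (k : Nat) (last : Int) : List Int :=
  match ls with
  | [] => []
  | l :: rest =>
    last :: prevList rest (k + 1) (if PySem.Str.strip l == "" then last else (k : Int))

-- end of a panel starting at `start`: first index of a qualifying prose pair lying at/after start
def findEnd (qual : List Bool) (pnb : List Int) (n start : Nat) : Nat :=
  match (List.range' start (n - start)).find?
      (fun j => qual.getD j false && decide ((start : Int) ≤ pnb.getD j (-1))) with
  | some j => j
  | none => n

-- outer while loop of B: collects kept line INDICES; window count is a prefix-sum difference
def goB (P : List Nat) (qual : List Bool) (pnb : List Int) (n i fuel : Nat) : List Nat :=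
  match fuel with
  | 0 => []
  | fuel + 1 =>
    if i < n then
      let w := min 8 (n - i)
      if P.getD (i + w) 0 - P.getD i 0 ≥ 4 then
        goB P qual pnb n (findEnd qual pnb n (i + w)) fuel
      else
        i :: goB P qual pnb n (i + 1) fuel
    else []

def strip_settings_panel_py_alt (text : String) : String :=
  let lines := PySem.Str.splitlines text
  let n := lines.length
  let sflag := lines.map isSettingsLine
  let prose := lines.map (fun l => !(PySem.Str.strip l == "") && !isSettingsLine l)
  let pnb := prevList lines 0 (-1)
  let P := sflag.scanl (fun a f => a + (if f then 1 else 0)) 0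
  let qual := (List.range n).map (fun j =>
    prose.getD j false &&
      (decide ((0 : Int) ≤ pnb.getD j (-1)) && prose.getD (pnb.getD j (-1)).toNat false))
  let keepIdx := goB P qual pnb n 0 n
  let candidate := PySem.Str.join "\n" (keepIdx.map (fun j => lines.getD j ""))
  if PySem.Str.len (PySem.Str.strip candidate) ≥ 100 then candidate else text

-- ===== PRECONDITION & SPEC =====
def Spec_strip_settings_panel_py (text : String) (out : String) : Prop := out = strip_settings_panel_py_alt text
instance (text : String) (out : String) : Decidable (Spec_strip_settings_panel_py text out) := by unfold Spec_strip_settings_panel_py; infer_instance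

-- ===== CLAIM (what is proved, stated in full; the proofs are below) =====
def Claim_equal_strip_settings_panel_py : Prop := ∀ (text : String), Dom_strip_settings_panel_py text → Spec_strip_settings_panel_py text (strip_settings_panel_py text)

-- ===== LEMMAS AND PROOFS =====

theorem getD_map_lt {α β : Type} (l : List α) (f : α → β) (j : Nat) (hj : j < l.length)
    (d : β) (d' : α) : (l.map f).getD j d = f (l.getD j d') := by
  simp [List.getD_eq_getElem?_getD, List.getElem?_eq_getElem hj]

theorem getD_range_map {β : Type} (n : Nat) (f : Nat → β) (j : Nat) (hj : j < n) (d : β) :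
    ((List.range n).map f).getD j d = f j := by
  have := getD_map_lt (List.range n) f j (by simp; exact hj) d 0
  simpa [List.getD_eq_getElem?_getD, List.getElem?_range hj] using this

theorem scanl_count_getD (l : List Bool) (a k : Nat) (hk : k ≤ l.length) :
    (List.scanl (fun a f => a + (if f then 1 else 0)) a l).getD k 0
      = a + (l.take k).countP (fun b => b) := by
  induction l generalizing a k with
  | nil =>
    have hk0 : k = 0 := by simpa using hk
    subst hk0; simp [List.scanl]
  | cons x xs ih =>
    cases k with
    | zero => simp [List.scanl]
    | succ k =>
      rw [List.scanl_cons, List.getD_cons_succ, List.take_succ_cons, List.countP_cons]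
      rw [ih (a + (if x then 1 else 0)) k (by simpa using hk)]
      by_cases hx : x = true
      · simp [hx]
        omega
      · simp [hx]

theorem window_count (lines : List String) (i w : Nat) (hw : i + w ≤ lines.length) :
    ((lines.map isSettingsLine).scanl (fun a f => a + (if f then 1 else 0)) 0).getD (i + w) 0
      - ((lines.map isSettingsLine).scanl (fun a f => a + (if f then 1 else 0)) 0).getD i 0
      = ((lines.drop i).take w).countP (fun l => isSettingsLine l) := by
  have hlen : (lines.map isSettingsLine).length = lines.length := by simp
  rw [scanl_count_getD _ _ _ (by omega), scanl_count_getD _ _ _ (by omega)]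
  have hsplit : (lines.map isSettingsLine).take (i + w)
      = (lines.map isSettingsLine).take i ++ (((lines.map isSettingsLine).drop i).take w) :=
    List.take_add ..
  rw [hsplit, List.countP_append]
  have : ((lines.map isSettingsLine).drop i).take w
      = ((lines.drop i).take w).map isSettingsLine := by
    simp [List.map_take, List.map_drop]
  rw [this, List.countP_map]
  simp only [Function.comp_def]
  omega

theorem prevList_getD_succ (ls : List String) (k : Nat) (last : Int) (j : Nat)
    (h : j + 1 < ls.length) :
    (prevList ls k last).getD (j + 1) (-1)
      = if PySem.Str.strip (ls.getD j "") == "" then (prevList ls k last).getD j (-1)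
        else ((k + j : Nat) : Int) := by
  induction ls generalizing k last j with
  | nil => simp at h
  | cons l rest ih =>
    cases j with
    | zero =>
      have hr : rest ≠ [] := by
        cases rest with
        | nil => simp at h
        | cons a b => simp
      cases rest with
      | nil => simp at h
      | cons a b =>
        by_cases hb : PySem.Str.strip l == ""
        · simp [prevList, hb]
        · simp [prevList, hb]
    | succ j =>
      have h' : j + 1 < rest.length := by simpa using h
      have := ih (k + 1) (if PySem.Str.strip l == "" then last else (k : Int)) j h'
      simp only [prevList, List.getD_cons_succ, List.getD_cons_succ] at *
      rw [this]
      have : k + 1 + j = k + (j + 1) := by omega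
      simp [this]

theorem prevList_getD_lt (ls : List String) (k : Nat) (last : Int) (j : Nat)
    (h : j < ls.length) (hl : last < (k : Int)) :
    (prevList ls k last).getD j (-1) < ((k + j : Nat) : Int) := by
  induction ls generalizing k last j with
  | nil => simp at h
  | cons l rest ih =>
    cases j with
    | zero => simpa [prevList] using hl
    | succ j =>
      have h' : j < rest.length := by simpa using h
      have hl' : (if PySem.Str.strip l == "" then last else (k : Int)) < ((k + 1 : Nat) : Int) := by
        split <;> [skip; skip] <;> push_cast <;> omega
      have := ih (k + 1) (if PySem.Str.strip l == "" then last else (k : Int)) j h' (by exact_mod_cast hl')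
      simp only [prevList, List.getD_cons_succ]
      have e : (k + 1) + j = k + (j + 1) := by omega
      rw [e] at this
      exact this

-- proof-side abbreviations (used only below the claim block)
def proseOf (lines : List String) : List Bool :=
  lines.map (fun l => !(PySem.Str.strip l == "") && !isSettingsLine l)

def qualOf (lines : List String) : List Bool :=
  (List.range lines.length).map (fun j =>
    (proseOf lines).getD j false &&
      (decide ((0 : Int) ≤ (prevList lines 0 (-1)).getD j (-1)) &&
        (proseOf lines).getD ((prevList lines 0 (-1)).getD j (-1)).toNat false))

theorem range'_cons_of_lt (j n : Nat) (h : j < n) :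
    List.range' j (n - j) = j :: List.range' (j + 1) (n - (j + 1)) := by
  have e : n - j = (n - (j + 1)) + 1 := by omega
  rw [e, List.range'_succ]

theorem skipA_eq_find_aux (lines : List String) :
    ∀ (fuel j streak start : Nat), start ≤ j → j ≤ lines.length → streak ≤ 1 →
    lines.length - j ≤ fuel →
    (j < lines.length →
      (streak = 1 ↔
        ((start : Int) ≤ (prevList lines 0 (-1)).getD j (-1) ∧
          (proseOf lines).getD ((prevList lines 0 (-1)).getD j (-1)).toNat false = true))) →
    skipA lines j streak fuel
      = (match (List.range' j (lines.length - j)).find?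
            (fun j' => (qualOf lines).getD j' false &&
              decide ((start : Int) ≤ (prevList lines 0 (-1)).getD j' (-1))) with
         | some j' => j'
         | none => lines.length) := by
  intro fuel
  induction fuel with
  | zero =>
    intro j streak start _ hjn _ hfuel _
    have : j = lines.length := by omega
    subst this
    simp [skipA]
  | succ fuel ih =>
    intro j streak start hsj hjn hstk hfuel hinv
    by_cases hj : j < lines.length
    · rw [range'_cons_of_lt j lines.length hj]
      have hq : (qualOf lines).getD j false
          = ((proseOf lines).getD j false &&
            (decide ((0 : Int) ≤ (prevList lines 0 (-1)).getD j (-1)) &&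
              (proseOf lines).getD ((prevList lines 0 (-1)).getD j (-1)).toNat false)) := by
        unfold qualOf
        exact getD_range_map lines.length _ j hj false
      have hp : (proseOf lines).getD j false
          = (!(PySem.Str.strip (lines.getD j "") == "") && !isSettingsLine (lines.getD j "")) := by
        unfold proseOf
        exact getD_map_lt lines _ j hj false ""
      have hinv' := hinv hj
      by_cases hb : PySem.Str.strip (lines.getD j "") == ""
      · -- blank line: both sides step over it (prevnb unchanged, streak kept)
        have hpf : ((qualOf lines).getD j false &&
            decide ((start : Int) ≤ (prevList lines 0 (-1)).getD j (-1))) = false := by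
          rw [hq, hp, hb]
          simp
        rw [skipA, if_pos hj, if_pos hb]
        rw [List.find?_cons_of_neg (fun hc => by rw [hpf] at hc; exact Bool.false_ne_true hc)]
        exact ih (j + 1) streak start (by omega) (by omega) hstk (by omega)
          (fun h1 => by
            rw [prevList_getD_succ lines 0 (-1) j h1, if_pos hb]
            exact hinv')
      · have hbf : (PySem.Str.strip (lines.getD j "") == "") = false :=
          Bool.eq_false_iff.mpr hb
        by_cases hs : isSettingsLine (lines.getD j "")
        · -- settings line: streak resets to 0; j does not qualify (not prose)
          have hpf : ((qualOf lines).getD j false &&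
              decide ((start : Int) ≤ (prevList lines 0 (-1)).getD j (-1))) = false := by
            rw [hq, hp, hs]
            simp
          rw [skipA, if_pos hj, if_neg hb]
          have hns : (!isSettingsLine (lines.getD j "")) = false := by rw [hs]; rfl
          rw [hns]
          simp only [Bool.false_eq_true, if_false]
          rw [List.find?_cons_of_neg (fun hc => by rw [hpf] at hc; exact Bool.false_ne_true hc)]
          exact ih (j + 1) 0 start (by omega) (by omega) (by omega) (by omega)
            (fun h1 => by
              rw [prevList_getD_succ lines 0 (-1) j h1, if_neg hb]
              have ht : ((0 + j : Nat) : Int).toNat = j := by simp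
              constructor
              · intro h; omega
              · rintro ⟨_, hpr⟩
                rw [ht, hp, hs] at hpr
                simp at hpr)
        · -- prose line
          have hsf : isSettingsLine (lines.getD j "") = false := Bool.eq_false_iff.mpr hs
          have hpj : (proseOf lines).getD j false = true := by
            rw [hp, hbf, hsf]; rfl
          rw [skipA, if_pos hj, if_neg hb]
          have hnp : (!isSettingsLine (lines.getD j "")) = true := by rw [hsf]; rfl
          rw [hnp]
          simp only [if_true]
          by_cases hstreak : streak = 1
          · -- second prose of a pair: both sides stop at j
            subst hstreak
            obtain ⟨h1, h2⟩ := hinv'.mp rfl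
            have h0 : (0 : Int) ≤ (prevList lines 0 (-1)).getD j (-1) := by
              have : (0 : Int) ≤ (start : Int) := Int.natCast_nonneg start
              omega
            have hpt : ((qualOf lines).getD j false &&
                decide ((start : Int) ≤ (prevList lines 0 (-1)).getD j (-1))) = true := by
              rw [hq, hpj, h2, decide_eq_true h0, decide_eq_true h1]
              rfl
            rw [if_pos (show 1 + 1 ≥ 2 by omega)]
            rw [List.find?_cons_of_pos (p := fun j' => (qualOf lines).getD j' false &&
              decide ((start : Int) ≤ (prevList lines 0 (-1)).getD j' (-1))) hpt]
          · -- first prose of a pair: streak becomes 1; j itself does not qualify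
            have hst0 : streak = 0 := by omega
            subst hst0
            have hRHS : ¬(((start : Int) ≤ (prevList lines 0 (-1)).getD j (-1)) ∧
                (proseOf lines).getD ((prevList lines 0 (-1)).getD j (-1)).toNat false = true) := by
              intro h
              have := hinv'.mpr h
              omega
            have hpf : ((qualOf lines).getD j false &&
                decide ((start : Int) ≤ (prevList lines 0 (-1)).getD j (-1))) = false := by
              by_cases hd : (start : Int) ≤ (prevList lines 0 (-1)).getD j (-1)
              · have hprf : (proseOf lines).getD
                    ((prevList lines 0 (-1)).getD j (-1)).toNat false = false := by
                  cases hxx : (proseOf lines).getD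
                      ((prevList lines 0 (-1)).getD j (-1)).toNat false with
                  | false => rfl
                  | true => exact absurd ⟨hd, hxx⟩ hRHS
                rw [hq, hprf]
                simp
              · rw [decide_eq_false hd]
                simp
            have hlt2 : ¬ (0 + 1 ≥ 2) := by omega
            rw [if_neg hlt2]
            rw [List.find?_cons_of_neg (fun hc => by rw [hpf] at hc; exact Bool.false_ne_true hc)]
            exact ih (j + 1) (0 + 1) start (by omega) (by omega) (by omega) (by omega)
              (fun h1 => by
                rw [prevList_getD_succ lines 0 (-1) j h1, if_neg hb]
                have ht : ((0 + j : Nat) : Int).toNat = j := by simp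
                constructor
                · intro _
                  refine ⟨?_, ?_⟩
                  · simp only [Nat.zero_add]
                    exact_mod_cast hsj
                  · rw [ht]; exact hpj
                · intro _; rfl)
    · have : j = lines.length := by omega
      subst this
      rw [skipA]
      simp

theorem skipA_eq_findEnd (lines : List String) (start : Nat) (hs : start ≤ lines.length) :
    skipA lines start 0 lines.length
      = findEnd (qualOf lines) (prevList lines 0 (-1)) lines.length start := by
  unfold findEnd
  refine skipA_eq_find_aux lines lines.length start 0 start (le_refl _) hs (by omega) (by omega) ?_
  intro hlt
  constructor
  · intro h; omega
  · rintro ⟨hge, _⟩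
    have := prevList_getD_lt lines 0 (-1) start hlt (by norm_num)
    simp only [Nat.zero_add] at this
    omega

theorem loopA_eq_goB (lines : List String) :
    ∀ (fuel i : Nat) (acc : List String),
    loopA lines i acc fuel
      = acc ++ (goB ((lines.map isSettingsLine).scanl (fun a f => a + (if f then 1 else 0)) 0)
          (qualOf lines) (prevList lines 0 (-1)) lines.length i fuel).map
            (fun j => lines.getD j "") := by
  intro fuel
  induction fuel with
  | zero => intro i acc; simp [loopA, goB]
  | succ fuel ih =>
    intro i acc
    rw [loopA, goB]
    by_cases h : i < lines.length
    · simp only [if_pos h]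
      have hw : i + min 8 (lines.length - i) ≤ lines.length := by omega
      rw [window_count lines i (min 8 (lines.length - i)) hw]
      split
      · rw [← skipA_eq_findEnd lines (i + min 8 (lines.length - i)) hw]
        exact ih _ _
      · rw [ih (i + 1) (acc ++ [lines.getD i ""])]
        simp
    · simp only [if_neg h]
      simp

-- ===== VERDICT (by name: the statement is the Claim_ definition above) =====
theorem strip_settings_panel_py_spec : Claim_equal_strip_settings_panel_py := by
  intro text _
  unfold Spec_strip_settings_panel_py
  simp only [strip_settings_panel_py, strip_settings_panel_py_alt]
  rw [loopA_eq_goB (PySem.Str.splitlines text) (PySem.Str.splitlines text).length 0 []]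
  rfl
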